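-- pv_equiv track=rewrite | github.com/Serfodi/WebLibrary | graf.py | ogrigationData
-- ===== SOURCE A (Python) =====
-- def ogrigationData(data):
--     names = []
--     values = []
--     for name, value in data:
--         if name is not None:
--             names.append(name)
--             values.append(value)
--     return names, values
-- ===== SOURCE B (Python) =====
-- def ogrigationData(data):
--     # Recursive decomposition: split off the head, recurse on the tail,
--     # and prepend the head's columns when its name is not None.
--     if not data:
--         return [], []
--     (name, value) = data[0]
--     names, values = ogrigationData(data[1:])
--     if name is not None:
--         names.insert(0, name)
--         values.insert(0, value)
--     return names, values
-- ===== Notes on version B (the rewrite author's own statement) =====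
-- stated objective: alternative
-- what changed: Replaces A's iterative forward loop with two append-accumulators by structural recursion on the list that builds both columns back-to-front via prepends to the recursive result.
import Mathlib
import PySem

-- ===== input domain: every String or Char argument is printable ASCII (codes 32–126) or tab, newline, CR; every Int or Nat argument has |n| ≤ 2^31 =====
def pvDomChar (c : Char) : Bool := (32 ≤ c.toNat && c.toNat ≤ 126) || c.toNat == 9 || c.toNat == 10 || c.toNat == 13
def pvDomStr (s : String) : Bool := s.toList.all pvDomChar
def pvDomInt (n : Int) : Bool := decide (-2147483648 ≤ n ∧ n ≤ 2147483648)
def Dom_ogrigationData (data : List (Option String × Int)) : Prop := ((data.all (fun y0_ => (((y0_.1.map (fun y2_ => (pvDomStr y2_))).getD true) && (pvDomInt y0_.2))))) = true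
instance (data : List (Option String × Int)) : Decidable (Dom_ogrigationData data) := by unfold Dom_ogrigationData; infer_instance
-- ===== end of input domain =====

-- B replaces A's iterative loop with two forward append-accumulators by structural
-- recursion on the list, building both columns back-to-front via prepends (alternative).

-- ===== PORT A =====
-- A: one forward loop appending to both accumulator lists when name is not None.
def ogrigationData (data : List (Option String × Int)) : List String × List Int :=
  data.foldl
    (fun acc p =>
      match p.1 with
      | some n => (acc.1 ++ [n], acc.2 ++ [p.2])
      | none => acc)
    ([], [])

-- ===== PORT B =====
-- B: recursion on head/tail; prepend (insert at 0) onto the recursive result.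
def ogrigationData_alt (data : List (Option String × Int)) : List String × List Int :=
  match data with
  | [] => ([], [])
  | (name, value) :: rest =>
    let r := ogrigationData_alt rest
    match name with
    | some n => (n :: r.1, value :: r.2)
    | none => r

-- ===== PRECONDITION & SPEC =====
def Spec_ogrigationData (data : List (Option String × Int)) (out : List String × List Int) : Prop := out = ogrigationData_alt data
instance (data : List (Option String × Int)) (out : List String × List Int) : Decidable (Spec_ogrigationData data out) := by unfold Spec_ogrigationData; infer_instance

-- ===== CLAIM =====
def Claim_equal_ogrigationData : Prop := ∀ (data : List (Option String × Int)), Dom_ogrigationData data → Spec_ogrigationData data (ogrigationData data)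

-- ===== LEMMAS AND PROOFS =====

-- A's foldl from an arbitrary accumulator appends B's recursive result columnwise.
theorem ogrigation_foldl_acc (data : List (Option String × Int)) (ns : List String) (vs : List Int) :
    data.foldl
      (fun acc p =>
        match p.1 with
        | some n => (acc.1 ++ [n], acc.2 ++ [p.2])
        | none => acc)
      (ns, vs)
    = (ns ++ (ogrigationData_alt data).1, vs ++ (ogrigationData_alt data).2) := by
  induction data generalizing ns vs with
  | nil => simp [ogrigationData_alt]
  | cons hd tl ih =>
    obtain ⟨o, v⟩ := hd
    cases o with
    | none => simpa [ogrigationData_alt] using ih ns vs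
    | some n => simpa [ogrigationData_alt] using ih (ns ++ [n]) (vs ++ [v])

-- ===== VERDICT =====
theorem ogrigationData_spec : Claim_equal_ogrigationData := by
  intro data _
  show _ = _
  simpa [ogrigationData] using ogrigation_foldl_acc data [] []
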